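-- pv_equiv track=rewrite | github.com/Shilenkovv/Algorithms_PyGen_bg | 6_search_algorithms/6_8_6.py | count_victories
-- ===== SOURCE A (Python) =====
-- def sum_of_squares(n):
--     return n * (n + 1) * (2 * n + 1) // 6
--
-- def count_victories(power):
--     right = 1
--     rivals = -1
--
--     while sum_of_squares(right) <= power:
--         right *= 2
--
--     left = right // 2
--
--     while left <= right:
--         middle = (left + right) // 2
--         if sum_of_squares(middle) <= power:
--             rivals = middle
--             left = middle + 1
--         else:
--             right = middle - 1
--
--     return rivals
-- ===== SOURCE B (Python) =====
-- def sum_of_squares(n):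
--     return n * (n + 1) * (2 * n + 1) // 6
--
-- def count_victories(power):
--     rivals = -1
--     n = 0
--     while sum_of_squares(n) <= power:
--         rivals = n
--         n += 1
--     return rivals
-- ===== Notes on version B (the rewrite author's own statement) =====
-- stated objective: simpler
-- what changed: Replaces the exponential upper-bound search followed by binary search with a single monotone upward linear scan that stops at the first n whose sum of squares exceeds power.
import Mathlib
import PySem

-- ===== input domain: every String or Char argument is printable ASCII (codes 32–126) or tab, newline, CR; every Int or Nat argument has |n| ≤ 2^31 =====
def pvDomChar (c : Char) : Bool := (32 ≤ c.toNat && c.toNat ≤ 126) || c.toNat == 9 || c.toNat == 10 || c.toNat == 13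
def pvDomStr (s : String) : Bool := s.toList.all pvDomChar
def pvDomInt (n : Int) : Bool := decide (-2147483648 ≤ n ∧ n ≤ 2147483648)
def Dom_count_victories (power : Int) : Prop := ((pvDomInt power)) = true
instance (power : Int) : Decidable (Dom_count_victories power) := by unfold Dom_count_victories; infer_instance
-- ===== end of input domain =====

-- B replaces A's exponential-bound + binary search by a single monotone upward scan (simpler; not faster).

-- ===== PORT A =====
-- shared helper: Python's sum_of_squares (closed form with '//')
def sum_of_squares (n : Int) : Int := PySem.Int.floordiv (n * (n + 1) * (2 * n + 1)) 6

-- used by the termination arguments of both ports' loops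
theorem le_sum_of_squares (n : Int) (hn : 0 ≤ n) : n ≤ sum_of_squares n := by
  unfold sum_of_squares
  rw [PySem.Int.le_floordiv_iff_mul_le (by norm_num)]
  rcases (by omega : n = 0 ∨ 1 ≤ n) with h | h
  · subst h; norm_num
  · nlinarith [mul_nonneg (mul_nonneg hn (by linarith : (0:Int) ≤ 2*n+5)) (by linarith : (0:Int) ≤ n-1)]

-- first while loop of A: double right while sum_of_squares(right) <= power
def cvLoop1 (power right : Int) (h1 : 1 ≤ right) : Int :=
  if sum_of_squares right ≤ power then
    cvLoop1 power (right * 2) (by omega)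
  else
    right
termination_by (power + 1 - right).toNat
decreasing_by
  have := le_sum_of_squares right (by omega)
  omega

-- second while loop of A: binary search for the largest middle with sum ≤ power
def cvLoop2 (power left right rivals : Int) : Int :=
  if h : left ≤ right then
    let middle := PySem.Int.floordiv (left + right) 2
    if sum_of_squares middle ≤ power then
      cvLoop2 power (middle + 1) right middle
    else
      cvLoop2 power left (middle - 1) rivals
  else
    rivals
termination_by (right + 1 - left).toNat
decreasing_by
  · have := PySem.Int.floordiv_two_mid_bounds h
    omega
  · have := PySem.Int.floordiv_two_mid_bounds h
    omega

def count_victories (power : Int) : Int :=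
  let right := cvLoop1 power 1 (by omega)
  cvLoop2 power (PySem.Int.floordiv right 2) right (-1)

-- ===== PORT B =====
-- B's single loop: scan n upward while sum_of_squares(n) <= power, remembering the last success
def cvScan (power n rivals : Int) (hn : 0 ≤ n) : Int :=
  if sum_of_squares n ≤ power then
    cvScan power (n + 1) n (by omega)
  else
    rivals
termination_by (power + 1 - n).toNat
decreasing_by
  have := le_sum_of_squares n hn
  omega

def count_victories_alt (power : Int) : Int := cvScan power 0 (-1) (by omega)

-- ===== PRECONDITION & SPEC =====
def Spec_count_victories (power : Int) (out : Int) : Prop := out = count_victories_alt power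
instance (power : Int) (out : Int) : Decidable (Spec_count_victories power out) := by unfold Spec_count_victories; infer_instance

-- ===== CLAIM (what is proved, stated in full; the proofs are below) =====
def Claim_equal_count_victories : Prop := ∀ (power : Int), Dom_count_victories power → Spec_count_victories power (count_victories power)

-- ===== LEMMAS AND PROOFS =====

-- monotonicity of sum_of_squares on the nonnegative integers
theorem sum_of_squares_mono {a b : Int} (ha : 0 ≤ a) (hab : a ≤ b) :
    sum_of_squares a ≤ sum_of_squares b := by
  unfold sum_of_squares
  rw [PySem.Int.floordiv_eq_ediv_of_pos (by norm_num),
      PySem.Int.floordiv_eq_ediv_of_pos (by norm_num)]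
  apply Int.ediv_le_ediv (by norm_num)
  nlinarith [mul_nonneg (sub_nonneg.2 hab) (mul_nonneg ha ha),
             mul_nonneg (sub_nonneg.2 hab) (mul_nonneg ha (ha.trans hab)),
             mul_nonneg (sub_nonneg.2 hab) (mul_nonneg (ha.trans hab) (ha.trans hab)),
             mul_nonneg (sub_nonneg.2 hab) (by linarith : (0:Int) ≤ a + b),
             sub_nonneg.2 hab]

-- the common characterisation of the answer
def GoodOut (power r : Int) : Prop :=
  (0 ≤ r ∧ sum_of_squares r ≤ power ∧ ¬ sum_of_squares (r + 1) ≤ power) ∨ (r = -1 ∧ power < 0)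

theorem sum_of_squares_zero : sum_of_squares 0 = 0 := by decide

theorem goodOut_unique {power r s : Int} (hr : GoodOut power r) (hs : GoodOut power s) : r = s := by
  rcases hr with ⟨hr0, hrP, hrN⟩ | ⟨hr1, hrneg⟩ <;>
    rcases hs with ⟨hs0, hsP, hsN⟩ | ⟨hs1, hsneg⟩
  · by_contra hne
    rcases (by omega : r + 1 ≤ s ∨ s + 1 ≤ r) with h | h
    · exact hrN ((sum_of_squares_mono (by omega) h).trans hsP)
    · exact hsN ((sum_of_squares_mono (by omega) h).trans hrP)
  · have := (le_sum_of_squares r hr0).trans hrP; omega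
  · have := (le_sum_of_squares s hs0).trans hsP; omega
  · omega

-- B's loop yields a GoodOut value
theorem cvScan_good (power n rivals : Int) (hn : 0 ≤ n) :
    rivals = n - 1 → (n = 0 ∨ sum_of_squares (n - 1) ≤ power) →
    GoodOut power (cvScan power n rivals hn) := by
  fun_induction cvScan power n rivals hn with
  | case1 n rivals hn hP ih =>
    intro hriv hprev
    exact ih (by omega) (Or.inr (by simpa using hP))
  | case2 n rivals hn hP =>
    intro hriv hprev
    rcases hprev with h0 | hOK
    · right
      subst h0; subst hriv
      rw [sum_of_squares_zero] at hP
      exact ⟨rfl, by omega⟩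
    · left
      have hn1 : 1 ≤ n := by
        by_contra h
        have hn0 : n = 0 := by omega
        subst hn0
        have h1 : sum_of_squares (-1) = 0 := by decide
        norm_num at hOK
        rw [h1] at hOK
        rw [sum_of_squares_zero] at hP
        omega
      refine ⟨by omega, by rw [hriv]; exact hOK, by rw [hriv]; simpa using hP⟩

-- A's first loop: the result R satisfies 1 ≤ R, ¬ sum(R) ≤ power, and R = 1 ∨ sum(R//2) ≤ power
theorem cvLoop1_prop (power right : Int) (h1 : 1 ≤ right) :
    (right = 1 ∨ sum_of_squares (PySem.Int.floordiv right 2) ≤ power) →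
    1 ≤ cvLoop1 power right h1 ∧ ¬ sum_of_squares (cvLoop1 power right h1) ≤ power ∧
      (cvLoop1 power right h1 = 1 ∨
        sum_of_squares (PySem.Int.floordiv (cvLoop1 power right h1) 2) ≤ power) := by
  fun_induction cvLoop1 power right h1 with
  | case1 right h1 hP ih =>
    intro _
    refine ih (Or.inr ?_)
    have h2 : PySem.Int.floordiv (right * 2) 2 = right := by
      rw [PySem.Int.floordiv_eq_ediv_of_pos (by norm_num)]
      omega
    rw [h2]; exact hP
  | case2 right h1 hP =>
    intro hpre
    exact ⟨h1, hP, hpre⟩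

-- A's binary search: the invariant gives a GoodOut result
theorem cvLoop2_good (power left right rivals : Int) :
    0 ≤ left → left ≤ right + 1 → ¬ sum_of_squares (right + 1) ≤ power →
    (sum_of_squares left ≤ power ∨ (left = 0 ∧ rivals = -1) ∨
      (sum_of_squares rivals ≤ power ∧ rivals = left - 1)) →
    GoodOut power (cvLoop2 power left right rivals) := by
  fun_induction cvLoop2 power left right rivals with
  | case1 left right rivals h middle hP ih =>
    intro hl0 hlr hr1 hdisj
    have hmid := PySem.Int.floordiv_two_mid_bounds h
    exact ih (by omega) (by omega) hr1 (Or.inr (Or.inr ⟨hP, by omega⟩))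
  | case2 left right rivals h middle hP ih =>
    intro hl0 hlr hr1 hdisj
    have hmid := PySem.Int.floordiv_two_mid_bounds h
    refine ih hl0 (by omega) (by simpa using hP) ?_
    rcases hdisj with hd | hd | hd
    · exact Or.inl hd
    · exact Or.inr (Or.inl hd)
    · exact Or.inr (Or.inr hd)
  | case3 left right rivals h =>
    intro hl0 hlr hr1 hdisj
    have hlr' : left = right + 1 := by omega
    subst hlr'
    rcases hdisj with hd | hd | hd
    · exact absurd hd hr1
    · right
      refine ⟨hd.2, ?_⟩
      have h0 := hr1
      rw [hd.1, sum_of_squares_zero] at h0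
      omega
    · have h1 : sum_of_squares (-1) = 0 := by decide
      have hriv0 : 0 ≤ rivals := by
        by_contra hneg
        have hriv : rivals = -1 := by omega
        have hr0 : right = -1 := by omega
        rw [hriv, h1] at hd
        have h0 : ¬ sum_of_squares 0 ≤ power := by
          rw [hr0] at hr1; simpa using hr1
        rw [sum_of_squares_zero] at h0
        omega
      left
      refine ⟨hriv0, hd.1, ?_⟩
      rw [show rivals + 1 = right + 1 by omega]
      exact hr1

theorem count_victories_good (power : Int) : GoodOut power (count_victories power) := by
  unfold count_victories
  have hR := cvLoop1_prop power 1 (by omega) (Or.inl rfl)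
  obtain ⟨hR1, hRN, hRhalf⟩ := hR
  set R := cvLoop1 power 1 (by omega) with hRdef
  have hdiv : PySem.Int.floordiv R 2 = R / 2 := PySem.Int.floordiv_eq_ediv_of_pos (by norm_num)
  apply cvLoop2_good
  · rw [hdiv]; omega
  · rw [hdiv]; omega
  · intro hc
    exact hRN ((sum_of_squares_mono (by omega) (by omega)).trans hc)
  · rcases hRhalf with h1 | h2
    · right; left
      constructor
      · rw [h1]; decide
      · rfl
    · exact Or.inl h2

theorem count_victories_alt_good (power : Int) : GoodOut power (count_victories_alt power) := by
  unfold count_victories_alt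
  exact cvScan_good power 0 (-1) (by omega) (by omega) (Or.inl rfl)

-- ===== VERDICT (by name: the statement is the Claim_ definition above) =====
theorem count_victories_spec : Claim_equal_count_victories := by
  intro power _
  unfold Spec_count_victories
  exact goodOut_unique (count_victories_good power) (count_victories_alt_good power)
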